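-- pv_equiv track=rewrite | github.com/andysizer/manim | gen_test_order.py | compute_file_rankings
-- ===== SOURCE A (Python) =====
-- from itertools import takewhile, repeat
--
-- def compute_file_rankings(imports):
--     def rank_todo(todo, seen):
--
--         def size_deps_not_seen(m, seen):
--             return len(imports[m] - seen)
--
--         def get_n(i):
--             (s, n) = i
--             return n
--
--         return sorted([(m, size_deps_not_seen(m, seen)) for m in todo], key=get_n)
--
--     def get_next_rank(ranked_todos):
--         # ranked_todos os sorted by (_, N)
--         (s, lowest_n) = ranked_todos[0]
--
--         def eq_lowest_n(i):
--             (s, n) = i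
--             return lowest_n == n
--
--         return lowest_n, {s for s, _n in set(takewhile(eq_lowest_n, ranked_todos))}
--
--     def rank_rank(rank):
--
--         def get_n(i):
--             (s, n) = i
--             return n
--
--         rankings = []
--         for s in rank:
--             n = 0
--             for s1 in rank:
--                 if s in imports[s1]:
--                     n = n + 1
--             rankings.append((s, n))
--         # N.B. reversed sort i.e. modules with most unseen dependencies appear first.
--         sorted_rankings = sorted(rankings, key=get_n, reverse=True)
--         return sorted_rankings
--
--     rankings = []
--     seen = set()
--     todo = set(imports.keys())
--     while len(todo) > 0:
--         ranked_todo = rank_todo(todo, seen)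
--         (num_outstanding_deps, next_rank) = get_next_rank(ranked_todo)
--         if (num_outstanding_deps == 0):
--             # easy case: just remove 'next_rank' from 'todo' and add to 'seen'
--             todo = todo - next_rank
--             seen = seen.union(next_rank)
--             rankings.append(next_rank)
--         else:
--             ranked_rank = rank_rank(next_rank)
--             (num_outstanding_deps, next_rank) = get_next_rank(ranked_rank)
--             todo = todo - next_rank
--             seen = seen.union(next_rank)
--             rankings.append(next_rank)
--     return rankings
-- ===== SOURCE B (Python) =====
-- def compute_file_rankings(imports):
--     rankings = []
--     seen = set()
--     todo = list(imports.keys())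
--     while todo:
--         cnt = [(m, sum(1 for d in imports[m] if d not in seen)) for m in todo]
--         mn = min(n for _, n in cnt)
--         group = [m for m, n in cnt if n == mn]
--         if mn == 0:
--             sel = group
--         else:
--             gset = set(group)
--             c = {}
--             for s1 in group:
--                 for d in imports[s1]:
--                     if d in gset:
--                         c[d] = c.get(d, 0) + 1
--             mx = max(c.get(s, 0) for s in group)
--             sel = [s for s in group if c.get(s, 0) == mx]
--         selset = set(sel)
--         todo = [m for m in todo if m not in selset]
--         seen |= selset
--         rankings.append(selset)
--     return rankings
-- ===== Notes on version B (the rewrite author's own statement) =====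
-- stated objective: faster
-- what changed: B drops A's per-round stable sort + takewhile selection (it computes the min/max count once and filters the list), and replaces A's quadratic in-group dependency re-scan by a counter dict built in one pass over the tie group's dependency sets.
import Mathlib
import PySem

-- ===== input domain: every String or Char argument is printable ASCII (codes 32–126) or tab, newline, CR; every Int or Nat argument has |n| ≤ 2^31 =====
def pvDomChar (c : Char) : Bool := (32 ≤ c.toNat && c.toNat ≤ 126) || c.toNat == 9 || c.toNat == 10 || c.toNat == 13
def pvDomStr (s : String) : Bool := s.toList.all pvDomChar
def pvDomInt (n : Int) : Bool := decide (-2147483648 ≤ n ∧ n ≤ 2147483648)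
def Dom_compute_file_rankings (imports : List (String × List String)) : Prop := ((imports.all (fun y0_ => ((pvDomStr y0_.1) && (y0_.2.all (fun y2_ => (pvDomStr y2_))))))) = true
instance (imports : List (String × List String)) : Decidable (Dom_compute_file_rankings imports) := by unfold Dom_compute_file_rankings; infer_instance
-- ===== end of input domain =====

-- B removes both per-round sorts (min/max + filter instead of sort + takewhile) and replaces A's quadratic
-- in-group dependency scan by a counter dict built in one pass over the group's dependencies (objective: faster;
-- measured).

-- shared dict access: imports[m] (first-match lookup per the convention; both Pythons read the same dict)
def pvImportsGet (imports : List (String × List String)) (m : String) : List String :=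
  (PySem.Dict.mk imports).getD m []

-- ===== PORT A =====
def pvA_sizeDepsNotSeen (imports : List (String × List String)) (m : String) (seen : PySem.Set String) : Int :=
  PySem.Set.len (PySem.Set.diff (PySem.Set.ofList (pvImportsGet imports m)) seen)

def pvA_rankTodo (imports : List (String × List String)) (todo : PySem.Set String) (seen : PySem.Set String) : List (String × Int) :=
  PySem.List.sorted (todo.map (fun m => (m, pvA_sizeDepsNotSeen imports m seen))) (fun i => i.2) false

def pvA_getNextRank (ranked : List (String × Int)) : Int × List String :=
  match ranked with
  | [] => (0, [])  -- unreachable totality guard: Python raises IndexError on []; A only calls this on nonempty lists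
  | p :: _ =>
    (p.2, PySem.Set.ofList ((PySem.Set.ofList (List.takeWhile (fun i => i.2 == p.2) ranked)).map (fun i => i.1)))

def pvA_rankRank (imports : List (String × List String)) (rank : List String) : List (String × Int) :=
  let rankings := rank.foldl (fun acc s =>
    acc ++ [(s, rank.foldl (fun n s1 => if (pvImportsGet imports s1).contains s then n + 1 else n) (0 : Int))]) []
  PySem.List.sorted rankings (fun i => i.2) true

def pvA_loop (imports : List (String × List String)) : Nat → PySem.Set String → PySem.Set String → List (List String) → List (List String)
  | 0, _, _, rankings => rankings  -- fuel guard only: each Python iteration removes ≥ 1 module, so fuel = |todo| suffices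
  | fuel + 1, todo, seen, rankings =>
    if 0 < todo.length then
      let r0 := pvA_getNextRank (pvA_rankTodo imports todo seen)
      let r := if r0.1 == 0 then r0 else pvA_getNextRank (pvA_rankRank imports r0.2)
      pvA_loop imports fuel (PySem.Set.diff todo r.2) (PySem.Set.union seen r.2) (rankings ++ [r.2])
    else rankings

def compute_file_rankings (imports : List (String × List String)) : List (List String) :=
  let todo := PySem.Set.ofList (PySem.Dict.mk imports).keys
  pvA_loop imports todo.length todo PySem.Set.empty []

-- ===== PORT B =====
def pvB_unseenCount (imports : List (String × List String)) (seen : PySem.Set String) (m : String) : Int :=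
  (PySem.Set.ofList (pvImportsGet imports m)).foldl (fun n d => if !(PySem.Set.contains seen d) then n + 1 else n) 0

def pvB_minInt (x : Int) (r : List Int) : Int := r.foldl (fun a b => if b < a then b else a) x  -- min() of x::r

def pvB_maxInt (x : Int) (r : List Int) : Int := r.foldl (fun a b => if a < b then b else a) x  -- max() of x::r

def pvB_round (imports : List (String × List String)) (todo : List String) (seen : PySem.Set String) : List String :=
  let cnt := todo.map (fun m => (m, pvB_unseenCount imports seen m))
  let vals := cnt.map (fun i => i.2)
  let mn := pvB_minInt (vals.headD 0) vals.tail  -- min() of a nonempty list; the headD default is unreachable (loop guard)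
  let group := (cnt.filter (fun i => i.2 == mn)).map (fun i => i.1)
  if mn == 0 then group
  else
    let gset := PySem.Set.ofList group
    let cdict := group.foldl (fun cd s1 =>
      (PySem.Set.ofList (pvImportsGet imports s1)).foldl
        (fun cd d => if gset.contains d then cd.modify d 0 (· + 1) else cd) cd) PySem.Dict.empty
    let ivals := group.map (fun s => cdict.getD s 0)
    let mx := pvB_maxInt (ivals.headD 0) ivals.tail  -- max() of a nonempty list; headD default unreachable
    group.filter (fun s => cdict.getD s 0 == mx)

def pvB_loop (imports : List (String × List String)) : Nat → List String → PySem.Set String → List (List String) → List (List String)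
  | 0, _, _, rankings => rankings  -- fuel guard only, as in port A
  | fuel + 1, todo, seen, rankings =>
    if todo.isEmpty then rankings
    else
      let sel := pvB_round imports todo seen
      let selset := PySem.Set.ofList sel
      pvB_loop imports fuel (todo.filter (fun m => !(selset.contains m))) (PySem.Set.union seen selset) (rankings ++ [selset])

def compute_file_rankings_alt (imports : List (String × List String)) : List (List String) :=
  let todo := PySem.Set.ofList (PySem.Dict.mk imports).keys
  pvB_loop imports todo.length todo PySem.Set.empty []

-- ===== PRECONDITION & SPEC =====
def Spec_compute_file_rankings (imports : List (String × List String)) (out : List (List String)) : Prop := out = compute_file_rankings_alt imports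
instance (imports : List (String × List String)) (out : List (List String)) : Decidable (Spec_compute_file_rankings imports out) := by unfold Spec_compute_file_rankings; infer_instance

-- ===== CLAIM (what is proved, stated in full; the proofs are below) =====
def Claim_equal_compute_file_rankings : Prop := ∀ (imports : List (String × List String)), Dom_compute_file_rankings imports → Spec_compute_file_rankings imports (compute_file_rankings imports)

-- ===== LEMMAS AND PROOFS =====

-- the two unseen-dependency counters agree
theorem pv_cnt_eq (imports : List (String × List String)) (seen : PySem.Set String) (m : String) :
    pvA_sizeDepsNotSeen imports m seen = pvB_unseenCount imports seen m := by
  unfold pvA_sizeDepsNotSeen pvB_unseenCount PySem.Set.diff PySem.Set.len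
  rw [PySem.List.foldl_count_if (fun d => !(PySem.Set.contains seen d))]
  simp [List.countP_eq_length_filter, PySem.Set.contains]

-- min/max specs
theorem pv_min_mem (x : Int) (r : List Int) : pvB_minInt x r ∈ x :: r := by
  unfold pvB_minInt
  induction r generalizing x with
  | nil => simp
  | cons b t ih =>
    simp only [List.foldl_cons]
    have h := ih (if b < x then b else x)
    rcases List.mem_cons.mp h with h1 | h1
    · rw [h1]; split_ifs
      · exact List.mem_cons_of_mem _ (List.mem_cons_self ..)
      · exact List.mem_cons_self ..
    · exact List.mem_cons_of_mem _ (List.mem_cons_of_mem _ h1)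

theorem pv_min_le (x : Int) (r : List Int) : ∀ v ∈ x :: r, pvB_minInt x r ≤ v := by
  unfold pvB_minInt
  induction r generalizing x with
  | nil => simp
  | cons b t ih =>
    intro v hv
    simp only [List.foldl_cons]
    rcases List.mem_cons.mp hv with rfl | hv2
    · calc List.foldl (fun a b => if b < a then b else a) (if b < v then b else v) t ≤ (if b < v then b else v) := ih _ _ (List.mem_cons_self ..)
        _ ≤ v := by split_ifs <;> omega
    · rcases List.mem_cons.mp hv2 with rfl | hv3
      · calc List.foldl (fun a b => if b < a then b else a) (if v < x then v else x) t ≤ (if v < x then v else x) := ih _ _ (List.mem_cons_self ..)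
          _ ≤ v := by split_ifs <;> omega
      · exact ih _ _ (List.mem_cons_of_mem _ hv3)

theorem pv_max_mem (x : Int) (r : List Int) : pvB_maxInt x r ∈ x :: r := by
  unfold pvB_maxInt
  induction r generalizing x with
  | nil => simp
  | cons b t ih =>
    simp only [List.foldl_cons]
    have h := ih (if x < b then b else x)
    rcases List.mem_cons.mp h with h1 | h1
    · rw [h1]; split_ifs
      · exact List.mem_cons_of_mem _ (List.mem_cons_self ..)
      · exact List.mem_cons_self ..
    · exact List.mem_cons_of_mem _ (List.mem_cons_of_mem _ h1)

theorem pv_le_max (x : Int) (r : List Int) : ∀ v ∈ x :: r, v ≤ pvB_maxInt x r := by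
  unfold pvB_maxInt
  induction r generalizing x with
  | nil => simp
  | cons b t ih =>
    intro v hv
    simp only [List.foldl_cons]
    rcases List.mem_cons.mp hv with rfl | hv2
    · calc v ≤ (if v < b then b else v) := by split_ifs <;> omega
        _ ≤ List.foldl (fun a b => if a < b then b else a) (if v < b then b else v) t := ih _ _ (List.mem_cons_self ..)
    · rcases List.mem_cons.mp hv2 with rfl | hv3
      · calc v ≤ (if x < v then v else x) := by split_ifs <;> omega
          _ ≤ List.foldl (fun a b => if a < b then b else a) (if x < v then v else x) t := ih _ _ (List.mem_cons_self ..)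
      · exact ih _ _ (List.mem_cons_of_mem _ hv3)

-- stability of insertion sort restricted to the extremal key class
theorem pv_filter_insertBy_min {α : Type} (key : α → Int) (c : Int) (x : α) (ys : List α)
    (hs : ys.Pairwise (fun a b => key a ≤ key b)) (hx : c ≤ key x) (hall : ∀ a ∈ ys, c ≤ key a) :
    (PySem.List.insertBy (fun a b => decide (key a < key b)) x ys).filter (fun a => key a == c) =
      if key x == c then ys.filter (fun a => key a == c) ++ [x] else ys.filter (fun a => key a == c) := by
  induction ys with
  | nil => by_cases h : key x = c <;> simp [PySem.List.insertBy, h]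
  | cons y t ih =>
    rw [List.pairwise_cons] at hs
    simp only [PySem.List.insertBy]
    by_cases hlt : key x < key y
    · simp only [hlt, decide_true, if_true]
      have hyc : ¬ (key y = c) := by
        have := hx; omega
      have htnil : t.filter (fun a => key a == c) = [] := by
        rw [List.filter_eq_nil_iff]
        intro a ha
        have h1 := hs.1 a ha
        simp only [beq_iff_eq]; omega
      by_cases hxc : key x = c
      · simp [List.filter_cons, hxc, hyc, htnil]
      · simp [List.filter_cons, hxc, hyc, htnil]
    · simp only [hlt, decide_false, Bool.false_eq_true, if_false]
      have ihh := ih hs.2 (fun a ha => hall a (List.mem_cons_of_mem _ ha))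
      by_cases hyc : key y = c <;> by_cases hxc : key x = c <;>
        simp [List.filter_cons, hyc, hxc, ihh]

theorem pv_filter_insertBy_max {α : Type} (key : α → Int) (c : Int) (x : α) (ys : List α)
    (hs : ys.Pairwise (fun a b => key b ≤ key a)) (hx : key x ≤ c) (hall : ∀ a ∈ ys, key a ≤ c) :
    (PySem.List.insertBy (fun a b => decide (key b < key a)) x ys).filter (fun a => key a == c) =
      if key x == c then ys.filter (fun a => key a == c) ++ [x] else ys.filter (fun a => key a == c) := by
  induction ys with
  | nil => by_cases h : key x = c <;> simp [PySem.List.insertBy, h]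
  | cons y t ih =>
    rw [List.pairwise_cons] at hs
    simp only [PySem.List.insertBy]
    by_cases hlt : key y < key x
    · simp only [hlt, decide_true, if_true]
      have hyc : ¬ (key y = c) := by
        have := hx; omega
      have htnil : t.filter (fun a => key a == c) = [] := by
        rw [List.filter_eq_nil_iff]
        intro a ha
        have h1 := hs.1 a ha
        simp only [beq_iff_eq]; omega
      by_cases hxc : key x = c
      · simp [List.filter_cons, hxc, hyc, htnil]
      · simp [List.filter_cons, hxc, hyc, htnil]
    · simp only [hlt, decide_false, Bool.false_eq_true, if_false]
      have ihh := ih hs.2 (fun a ha => hall a (List.mem_cons_of_mem _ ha))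
      by_cases hyc : key y = c <;> by_cases hxc : key x = c <;>
        simp [List.filter_cons, hyc, hxc, ihh]

-- stable sort keeps the min-key class in input order
theorem pv_filter_sorted_min {α : Type} (xs : List α) (key : α → Int) (c : Int)
    (hall : ∀ a ∈ xs, c ≤ key a) :
    (PySem.List.sorted xs key false).filter (fun a => key a == c) = xs.filter (fun a => key a == c) := by
  induction xs using List.reverseRecOn with
  | nil => simp [PySem.List.sorted]
  | append_singleton xs x ih =>
    have hx : c ≤ key x := hall x (by simp)
    have hall2 : ∀ a ∈ xs, c ≤ key a := fun a ha => hall a (by simp [ha])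
    rw [PySem.List.sorted_eq_foldl_insertBy, List.foldl_append, List.foldl_cons, List.foldl_nil,
      ← PySem.List.sorted_eq_foldl_insertBy]
    rw [pv_filter_insertBy_min key c x _ (PySem.List.sorted_pairwise xs key)
      hx (fun a ha => hall2 a ((PySem.List.mem_sorted _ _ _ _).mp ha))]
    rw [List.filter_append, ih hall2, List.filter_cons]
    by_cases hxc : key x = c <;> simp [hxc]

theorem pv_filter_sorted_max {α : Type} (xs : List α) (key : α → Int) (c : Int)
    (hall : ∀ a ∈ xs, key a ≤ c) :
    (PySem.List.sorted xs key true).filter (fun a => key a == c) = xs.filter (fun a => key a == c) := by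
  induction xs using List.reverseRecOn with
  | nil => simp [PySem.List.sorted]
  | append_singleton xs x ih =>
    have hx : key x ≤ c := hall x (by simp)
    have hall2 : ∀ a ∈ xs, key a ≤ c := fun a ha => hall a (by simp [ha])
    rw [PySem.List.sorted_rev_eq_foldl_insertBy, List.foldl_append, List.foldl_cons, List.foldl_nil,
      ← PySem.List.sorted_rev_eq_foldl_insertBy]
    rw [pv_filter_insertBy_max key c x _ (PySem.List.sorted_pairwise_rev xs key)
      hx (fun a ha => hall2 a ((PySem.List.mem_sorted _ _ _ _).mp ha))]
    rw [List.filter_append, ih hall2, List.filter_cons]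
    by_cases hxc : key x = c <;> simp [hxc]

-- takewhile at head = filter of the extremal class, on a sorted list
theorem pv_takeWhile_eq_filter_min {α : Type} (key : α → Int) (c : Int) (zs : List α)
    (hs : zs.Pairwise (fun a b => key a ≤ key b)) (hall : ∀ a ∈ zs, c ≤ key a) :
    zs.takeWhile (fun a => key a == c) = zs.filter (fun a => key a == c) := by
  induction zs with
  | nil => simp
  | cons z t ih =>
    rw [List.pairwise_cons] at hs
    by_cases hz : key z = c
    · rw [List.takeWhile_cons, List.filter_cons]
      simp only [hz, beq_self_eq_true, if_true]
      rw [ih hs.2 (fun a ha => hall a (List.mem_cons_of_mem _ ha))]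
    · have hzc : c < key z := lt_of_le_of_ne (hall z (by simp)) (fun h => hz h.symm)
      have htnil : t.filter (fun a => key a == c) = [] := by
        rw [List.filter_eq_nil_iff]
        intro a ha
        have := hs.1 a ha
        simp only [beq_iff_eq]; omega
      rw [List.takeWhile_cons, List.filter_cons]
      simp [hz, htnil]

theorem pv_takeWhile_eq_filter_max {α : Type} (key : α → Int) (c : Int) (zs : List α)
    (hs : zs.Pairwise (fun a b => key b ≤ key a)) (hall : ∀ a ∈ zs, key a ≤ c) :
    zs.takeWhile (fun a => key a == c) = zs.filter (fun a => key a == c) := by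
  induction zs with
  | nil => simp
  | cons z t ih =>
    rw [List.pairwise_cons] at hs
    by_cases hz : key z = c
    · rw [List.takeWhile_cons, List.filter_cons]
      simp only [hz, beq_self_eq_true, if_true]
      rw [ih hs.2 (fun a ha => hall a (List.mem_cons_of_mem _ ha))]
    · have hzc : key z < c := lt_of_le_of_ne (hall z (by simp)) hz
      have htnil : t.filter (fun a => key a == c) = [] := by
        rw [List.filter_eq_nil_iff]
        intro a ha
        have := hs.1 a ha
        simp only [beq_iff_eq]; omega
      rw [List.takeWhile_cons, List.filter_cons]
      simp [hz, htnil]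

-- count in a nodup list
theorem pv_count_nodup {α : Type} [DecidableEq α] (l : List α) (hl : l.Nodup) (a : α) :
    l.count a = if a ∈ l then 1 else 0 := by
  induction l with
  | nil => simp
  | cons x t ih =>
    rw [List.nodup_cons] at hl
    rw [List.count_cons, ih hl.2]
    by_cases hax : a = x
    · subst hax
      simp [hl.1]
    · simp [hax, Ne.symm hax]

-- B's counter dict = A's membership count, pointwise on the group
theorem pv_counter_eq (imports : List (String × List String)) (gset : PySem.Set String)
    (group : List String) (s : String) (hs : PySem.Set.contains gset s = true) (cd : PySem.Dict String Int) :
    (group.foldl (fun cd s1 =>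
      (PySem.Set.ofList (pvImportsGet imports s1)).foldl
        (fun cd d => if gset.contains d then cd.modify d 0 (· + 1) else cd) cd) cd).getD s 0 =
      cd.getD s 0 + (group.countP (fun s1 => (pvImportsGet imports s1).contains s) : Int) := by
  induction group generalizing cd with
  | nil => simp
  | cons g gs ih =>
    rw [List.foldl_cons, ih, List.countP_cons]
    have hinner : ((PySem.Set.ofList (pvImportsGet imports g)).foldl
        (fun cd d => if gset.contains d then cd.modify d 0 (· + 1) else cd) cd).getD s 0 =
        cd.getD s 0 + ((if (pvImportsGet imports g).contains s then 1 else 0 : Int)) := by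
      rw [← List.foldl_filter, PySem.Dict.getD_foldl_modify_add_one]
      congr 1
      rw [List.count_filter hs, pv_count_nodup _ (PySem.Set.nodup_ofList _) s]
      by_cases hmem : s ∈ pvImportsGet imports g
      · simp [PySem.Set.mem_ofList, hmem]
      · simp [PySem.Set.mem_ofList, hmem]
    rw [hinner]
    by_cases hc : (pvImportsGet imports g).contains s <;> simp <;> ring

theorem pv_sorted_head_min {α : Type} (xs : List α) (key : α → Int) (p : α) (t : List α)
    (h : PySem.List.sorted xs key false = p :: t) :
    p ∈ xs ∧ (∀ y ∈ xs, key p ≤ key y) := by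
  constructor
  · exact (PySem.List.mem_sorted _ _ _ _).mp (h ▸ List.mem_cons_self ..)
  · exact PySem.List.key_head_sorted_le xs key h

theorem pv_sorted_head_max {α : Type} (xs : List α) (key : α → Int) (p : α) (t : List α)
    (h : PySem.List.sorted xs key true = p :: t) :
    p ∈ xs ∧ (∀ y ∈ xs, key y ≤ key p) := by
  constructor
  · exact (PySem.List.mem_sorted _ _ _ _).mp (h ▸ List.mem_cons_self ..)
  · exact PySem.List.key_head_sorted_rev_ge xs key h

-- A's takewhile-at-head prefix over the stable sort = the plain filter over the input, both ways round
theorem pv_tw_min {α : Type} (xs : List α) (key : α → Int) (p : α) (t : List α)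
    (h : PySem.List.sorted xs key false = p :: t) :
    (PySem.List.sorted xs key false).takeWhile (fun a => key a == key p) =
      xs.filter (fun a => key a == key p) := by
  obtain ⟨-, hle⟩ := pv_sorted_head_min xs key p t h
  rw [pv_takeWhile_eq_filter_min key (key p) _ (PySem.List.sorted_pairwise xs key)
    (fun a ha => hle a ((PySem.List.mem_sorted _ _ _ _).mp ha)),
    pv_filter_sorted_min xs key _ hle]

theorem pv_tw_max {α : Type} (xs : List α) (key : α → Int) (p : α) (t : List α)
    (h : PySem.List.sorted xs key true = p :: t) :
    (PySem.List.sorted xs key true).takeWhile (fun a => key a == key p) =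
      xs.filter (fun a => key a == key p) := by
  obtain ⟨-, hle⟩ := pv_sorted_head_max xs key p t h
  rw [pv_takeWhile_eq_filter_max key (key p) _ (PySem.List.sorted_pairwise_rev xs key)
    (fun a ha => hle a ((PySem.List.mem_sorted _ _ _ _).mp ha)),
    pv_filter_sorted_max xs key _ hle]

theorem pv_pairs_filter {α : Type} (l : List α) (F : α → Int) (c : Int) :
    ((l.map (fun m => (m, F m))).filter (fun i => i.2 == c)).map (fun i => i.1) =
      l.filter (fun m => F m == c) := by
  rw [List.filter_map, List.map_map]
  simp [Function.comp_def]

theorem pv_map_snd {α : Type} (l : List α) (F : α → Int) :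
    (l.map (fun m => (m, F m))).map (fun i : α × Int => i.2) = l.map F := by simp

-- one ranking pass of A: head key c is the extremal count, and the selected set is the plain filter at c
theorem pv_select_min (l : List String) (F : String → Int) (hne : l ≠ []) (hnd : l.Nodup) :
    ∃ c, pvA_getNextRank (PySem.List.sorted (l.map (fun m => (m, F m))) (fun i => i.2) false) =
        (c, l.filter (fun m => F m == c)) ∧ (∀ m ∈ l, c ≤ F m) ∧ (∃ m ∈ l, F m = c) := by
  have hpne : l.map (fun m => (m, F m)) ≠ [] := by
    intro h; exact hne (List.map_eq_nil_iff.mp h)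
  cases hzs : PySem.List.sorted (l.map (fun m => (m, F m))) (fun i => i.2) false with
  | nil => exact absurd ((PySem.List.sorted_eq_nil_iff _ _ _).mp hzs) hpne
  | cons p ts =>
    obtain ⟨hpmem, hple⟩ := pv_sorted_head_min _ _ p ts hzs
    have hpairs_nd : (l.map (fun m => (m, F m))).Nodup :=
      hnd.map (fun a b hab => congrArg Prod.fst hab)
    have hzs_nd : (PySem.List.sorted (l.map (fun m => (m, F m))) (fun i => i.2) false).Nodup :=
      ((PySem.List.sorted_perm _ _ _).nodup_iff).mpr hpairs_nd
    have htw_nd : ((p :: ts).takeWhile (fun i => i.2 == p.2)).Nodup := by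
      rw [← hzs]; exact (List.takeWhile_sublist _).nodup hzs_nd
    refine ⟨p.2, ?_, ?_, ?_⟩
    · show (p.2, PySem.Set.ofList ((PySem.Set.ofList
          (List.takeWhile (fun i => i.2 == p.2) (p :: ts))).map (fun i => i.1))) = _
      rw [PySem.Set.ofList_eq_self_of_nodup _ htw_nd, ← hzs, pv_tw_min _ _ p ts hzs,
        pv_pairs_filter l F p.2, PySem.Set.ofList_eq_self_of_nodup _ (hnd.filter _)]
    · intro m hm
      exact hple (m, F m) (List.mem_map_of_mem hm)
    · obtain ⟨m, hm, hpm⟩ := List.mem_map.mp hpmem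
      exact ⟨m, hm, congrArg Prod.snd hpm⟩

theorem pv_select_max (l : List String) (F : String → Int) (hne : l ≠ []) (hnd : l.Nodup) :
    ∃ c, pvA_getNextRank (PySem.List.sorted (l.map (fun m => (m, F m))) (fun i => i.2) true) =
        (c, l.filter (fun m => F m == c)) ∧ (∀ m ∈ l, F m ≤ c) ∧ (∃ m ∈ l, F m = c) := by
  have hpne : l.map (fun m => (m, F m)) ≠ [] := by
    intro h; exact hne (List.map_eq_nil_iff.mp h)
  cases hzs : PySem.List.sorted (l.map (fun m => (m, F m))) (fun i => i.2) true with
  | nil => exact absurd ((PySem.List.sorted_eq_nil_iff _ _ _).mp hzs) hpne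
  | cons p ts =>
    obtain ⟨hpmem, hple⟩ := pv_sorted_head_max _ _ p ts hzs
    have hpairs_nd : (l.map (fun m => (m, F m))).Nodup :=
      hnd.map (fun a b hab => congrArg Prod.fst hab)
    have hzs_nd : (PySem.List.sorted (l.map (fun m => (m, F m))) (fun i => i.2) true).Nodup :=
      ((PySem.List.sorted_perm _ _ _).nodup_iff).mpr hpairs_nd
    have htw_nd : ((p :: ts).takeWhile (fun i => i.2 == p.2)).Nodup := by
      rw [← hzs]; exact (List.takeWhile_sublist _).nodup hzs_nd
    refine ⟨p.2, ?_, ?_, ?_⟩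
    · show (p.2, PySem.Set.ofList ((PySem.Set.ofList
          (List.takeWhile (fun i => i.2 == p.2) (p :: ts))).map (fun i => i.1))) = _
      rw [PySem.Set.ofList_eq_self_of_nodup _ htw_nd, ← hzs, pv_tw_max _ _ p ts hzs,
        pv_pairs_filter l F p.2, PySem.Set.ofList_eq_self_of_nodup _ (hnd.filter _)]
    · intro m hm
      exact hple (m, F m) (List.mem_map_of_mem hm)
    · obtain ⟨m, hm, hpm⟩ := List.mem_map.mp hpmem
      exact ⟨m, hm, congrArg Prod.snd hpm⟩

-- B's min()/max() over the mapped counts: bounds and attainment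
theorem pv_minB_spec (l : List String) (F : String → Int) (hne : l ≠ []) :
    (∀ m ∈ l, pvB_minInt ((l.map F).headD 0) (l.map F).tail ≤ F m) ∧
    (∃ m ∈ l, F m = pvB_minInt ((l.map F).headD 0) (l.map F).tail) := by
  cases l with
  | nil => exact absurd rfl hne
  | cons a r =>
    simp only [List.map_cons, List.headD_cons, List.tail_cons]
    have hmem := pv_min_mem (F a) (r.map F)
    have hle := pv_min_le (F a) (r.map F)
    constructor
    · intro m hm
      apply hle
      rcases List.mem_cons.mp hm with rfl | h
      · exact List.mem_cons_self ..
      · exact List.mem_cons_of_mem _ (List.mem_map_of_mem h)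
    · rcases List.mem_cons.mp hmem with h | h
      · exact ⟨a, List.mem_cons_self .., h.symm⟩
      · obtain ⟨m, hm, heq⟩ := List.mem_map.mp h
        exact ⟨m, List.mem_cons_of_mem _ hm, heq⟩

theorem pv_maxB_spec (l : List String) (F : String → Int) (hne : l ≠ []) :
    (∀ m ∈ l, F m ≤ pvB_maxInt ((l.map F).headD 0) (l.map F).tail) ∧
    (∃ m ∈ l, F m = pvB_maxInt ((l.map F).headD 0) (l.map F).tail) := by
  cases l with
  | nil => exact absurd rfl hne
  | cons a r =>
    simp only [List.map_cons, List.headD_cons, List.tail_cons]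
    have hmem := pv_max_mem (F a) (r.map F)
    have hle := pv_le_max (F a) (r.map F)
    constructor
    · intro m hm
      apply hle
      rcases List.mem_cons.mp hm with rfl | h
      · exact List.mem_cons_self ..
      · exact List.mem_cons_of_mem _ (List.mem_map_of_mem h)
    · rcases List.mem_cons.mp hmem with h | h
      · exact ⟨a, List.mem_cons_self .., h.symm⟩
      · obtain ⟨m, hm, heq⟩ := List.mem_map.mp h
        exact ⟨m, List.mem_cons_of_mem _ hm, heq⟩

-- selected modules of one round agree
theorem pv_round_eq (imports : List (String × List String)) (todo : List String) (seen : PySem.Set String)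
    (hne : todo ≠ []) (hnd : todo.Nodup) :
    (let r0 := pvA_getNextRank (pvA_rankTodo imports todo seen)
     (if r0.1 == 0 then r0 else pvA_getNextRank (pvA_rankRank imports r0.2)).2) =
      pvB_round imports todo seen := by
  have hcnt : (fun m => (m, pvB_unseenCount imports seen m))
      = (fun m => (m, pvA_sizeDepsNotSeen imports m seen)) :=
    funext fun m => by rw [pv_cnt_eq]
  obtain ⟨c, hA0, hcle, hcatt⟩ :=
    pv_select_min todo (fun m => pvA_sizeDepsNotSeen imports m seen) hne hnd
  obtain ⟨hmle, hmatt⟩ := pv_minB_spec todo (fun m => pvA_sizeDepsNotSeen imports m seen) hne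
  have hMc : pvB_minInt ((todo.map (fun m => pvA_sizeDepsNotSeen imports m seen)).headD 0)
      (todo.map (fun m => pvA_sizeDepsNotSeen imports m seen)).tail = c := by
    obtain ⟨m1, hm1, hFm1⟩ := hmatt
    obtain ⟨m2, hm2, hFm2⟩ := hcatt
    have h1 : c ≤ pvA_sizeDepsNotSeen imports m1 seen := hcle m1 hm1
    have h2 := hmle m2 hm2
    rw [hFm1] at h1
    rw [hFm2] at h2
    omega
  show (if (pvA_getNextRank (pvA_rankTodo imports todo seen)).1 == 0
        then pvA_getNextRank (pvA_rankTodo imports todo seen)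
        else pvA_getNextRank (pvA_rankRank imports
          (pvA_getNextRank (pvA_rankTodo imports todo seen)).2)).2
      = pvB_round imports todo seen
  have hrt : pvA_rankTodo imports todo seen = PySem.List.sorted
      (todo.map (fun m => (m, pvA_sizeDepsNotSeen imports m seen))) (fun i => i.2) false := rfl
  rw [hrt, hA0]
  simp only [pvB_round]
  rw [hcnt, pv_map_snd, hMc, pv_pairs_filter todo (fun m => pvA_sizeDepsNotSeen imports m seen) c]
  by_cases hc0 : c = 0
  · simp [hc0]
  · have hcc : (c == 0) = false := by simp [hc0]
    simp only [hcc, Bool.false_eq_true, if_false]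
    -- the tie-breaking pass
    have hG0ne : todo.filter (fun m => pvA_sizeDepsNotSeen imports m seen == c) ≠ [] := by
      obtain ⟨m2, hm2, hFm2⟩ := hcatt
      exact List.ne_nil_of_mem (List.mem_filter.mpr ⟨hm2, by simp [hFm2]⟩)
    have hG0nd : (todo.filter (fun m => pvA_sizeDepsNotSeen imports m seen == c)).Nodup :=
      hnd.filter _
    set G0 := todo.filter (fun m => pvA_sizeDepsNotSeen imports m seen == c) with hG0
    have hrr : pvA_rankRank imports G0 = PySem.List.sorted
        (G0.map (fun s => (s, G0.foldl
          (fun n s1 => if (pvImportsGet imports s1).contains s then n + 1 else n) (0 : Int))))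
        (fun i => i.2) true := by
      show PySem.List.sorted (G0.foldl (fun acc s => acc ++ [(s, G0.foldl
          (fun n s1 => if (pvImportsGet imports s1).contains s then n + 1 else n) (0 : Int))]) [])
          (fun i => i.2) true = _
      rw [PySem.List.foldl_append_singleton_eq_map, List.nil_append]
    have hind : (fun s => (s, G0.foldl
          (fun n s1 => if (pvImportsGet imports s1).contains s then n + 1 else n) (0 : Int)))
        = (fun s => (s, (G0.countP (fun s1 => (pvImportsGet imports s1).contains s) : Int))) :=
      funext fun s => by
        rw [PySem.List.foldl_count_if (fun s1 => (pvImportsGet imports s1).contains s)]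
        rw [zero_add]
    obtain ⟨c2, hA2, hc2le, hc2att⟩ := pv_select_max G0
      (fun s => (G0.countP (fun s1 => (pvImportsGet imports s1).contains s) : Int)) hG0ne hG0nd
    rw [hrr, hind, hA2]
    -- B's counter dict agrees with A's in-group dependency count
    have hGd : ∀ s ∈ G0, (G0.foldl (fun cd s1 =>
        (PySem.Set.ofList (pvImportsGet imports s1)).foldl
          (fun cd d => if (PySem.Set.ofList G0).contains d then cd.modify d 0 (· + 1) else cd) cd)
        PySem.Dict.empty).getD s 0 =
        (G0.countP (fun s1 => (pvImportsGet imports s1).contains s) : Int) := by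
      intro s hs
      rw [pv_counter_eq imports (PySem.Set.ofList G0) G0 s
        ((PySem.Set.contains_iff _ _).mpr ((PySem.Set.mem_ofList _ _).mpr hs)) PySem.Dict.empty,
        PySem.Dict.getD_empty, zero_add]
    have hivals : G0.map (fun s => (G0.foldl (fun cd s1 =>
        (PySem.Set.ofList (pvImportsGet imports s1)).foldl
          (fun cd d => if (PySem.Set.ofList G0).contains d then cd.modify d 0 (· + 1) else cd) cd)
        PySem.Dict.empty).getD s 0) =
        G0.map (fun s => (G0.countP (fun s1 => (pvImportsGet imports s1).contains s) : Int)) :=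
      List.map_congr_left hGd
    rw [hivals]
    obtain ⟨hxle, hxatt⟩ := pv_maxB_spec G0
      (fun s => (G0.countP (fun s1 => (pvImportsGet imports s1).contains s) : Int)) hG0ne
    have hmx : pvB_maxInt ((G0.map (fun s =>
        (G0.countP (fun s1 => (pvImportsGet imports s1).contains s) : Int))).headD 0)
        (G0.map (fun s =>
        (G0.countP (fun s1 => (pvImportsGet imports s1).contains s) : Int))).tail = c2 := by
      obtain ⟨m1, hm1, hFm1⟩ := hxatt
      obtain ⟨m2, hm2, hFm2⟩ := hc2att
      have h1 := hc2le m1 hm1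
      have h2 := hxle m2 hm2
      omega
    rw [hmx]
    exact (List.filter_congr (fun s hs => by rw [hGd s hs])).symm

theorem pv_round_nodup (imports : List (String × List String)) (todo : List String) (seen : PySem.Set String)
    (hnd : todo.Nodup) : (pvB_round imports todo seen).Nodup := by
  have hg : ∀ c : Int, (((todo.map (fun m => (m, pvB_unseenCount imports seen m))).filter
      (fun i => i.2 == c)).map (fun i => i.1)).Nodup := by
    intro c
    rw [pv_pairs_filter todo (fun m => pvB_unseenCount imports seen m) c]
    exact hnd.filter _
  simp only [pvB_round]
  split_ifs
  · exact hg _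
  · exact (hg _).filter _

theorem pv_loop_eq (imports : List (String × List String)) (fuel : Nat) (todo : List String)
    (seen : PySem.Set String) (rankings : List (List String)) (hnd : todo.Nodup) :
    pvA_loop imports fuel todo seen rankings = pvB_loop imports fuel todo seen rankings := by
  induction fuel generalizing todo seen rankings with
  | zero => rfl
  | succ fuel ih =>
    by_cases htodo : todo = []
    · subst htodo
      simp [pvA_loop, pvB_loop]
    · have hlen : 0 < todo.length := List.length_pos_iff.mpr htodo
      have hemp : todo.isEmpty = false := by
        simp [htodo]
      have hsel := pv_round_eq imports todo seen htodo hnd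
      have hselnd := pv_round_nodup imports todo seen hnd
      have hof : PySem.Set.ofList (pvB_round imports todo seen) = pvB_round imports todo seen :=
        PySem.Set.ofList_eq_self_of_nodup _ hselnd
      simp only [pvA_loop, pvB_loop, hlen, if_true, hemp, Bool.false_eq_true, if_false]
      rw [hsel, hof]
      exact ih _ _ _ (hnd.filter _)

-- ===== VERDICT (by name: the statement is the Claim_ definition above) =====
theorem compute_file_rankings_spec : Claim_equal_compute_file_rankings := by
  intro imports _
  unfold Spec_compute_file_rankings compute_file_rankings compute_file_rankings_alt
  exact pv_loop_eq imports _ _ _ _ (PySem.Set.nodup_ofList _)
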